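-- pv_equiv track=rewrite | github.com/hi-paris/Image-Segmentation | data-generation/create_configs.py | get_matcher
-- ===== SOURCE A (Python) =====
-- def get_matcher(data_for_matcher, index):
--     """
--     Creates a matcher dictionary from the given data for a specific index.
--
--     Parameters
--     ----------
--     data_for_matcher : dict
--         The data containing matching information.
--     index : int
--         The index of the data to process.
--
--     Returns
--     -------
--     dict
--         A dictionary mapping the matched IDs.
--     """
--     max_per_y = {}
--     matcher = {}
--     data_ = data_for_matcher[index]
--     for (x, y), value in data_.items():
--         if y not in max_per_y or value > max_per_y[y][1]:
--             max_per_y[y] = (x, value)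
--             if len(str(x)) > 3:
--                 matcher[int(y)] = int(str(x)[:2])
--             else:
--                 matcher[int(y)] = int(x)
--     return matcher
-- ===== SOURCE B (Python) =====
-- def get_matcher(data_for_matcher, index):
--     groups = {}
--     for (x, y), value in data_for_matcher[index].items():
--         groups.setdefault(y, []).append((x, value))
--     matcher = {}
--     for y, pairs in groups.items():
--         x = max(pairs, key=lambda p: p[1])[0]
--         matcher[int(y)] = int(str(x)[:2]) if len(str(x)) > 3 else int(x)
--     return matcher
-- ===== Notes on version B (the rewrite author's own statement) =====
-- stated objective: alternative
-- what changed: A interleaves an online running-max tracker with in-place matcher updates in a single loop; B first groups the (x, value) pairs by y, then computes each group's first-maximal pair with max(..., key=...) and builds the matcher in a second pass.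
import Mathlib
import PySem

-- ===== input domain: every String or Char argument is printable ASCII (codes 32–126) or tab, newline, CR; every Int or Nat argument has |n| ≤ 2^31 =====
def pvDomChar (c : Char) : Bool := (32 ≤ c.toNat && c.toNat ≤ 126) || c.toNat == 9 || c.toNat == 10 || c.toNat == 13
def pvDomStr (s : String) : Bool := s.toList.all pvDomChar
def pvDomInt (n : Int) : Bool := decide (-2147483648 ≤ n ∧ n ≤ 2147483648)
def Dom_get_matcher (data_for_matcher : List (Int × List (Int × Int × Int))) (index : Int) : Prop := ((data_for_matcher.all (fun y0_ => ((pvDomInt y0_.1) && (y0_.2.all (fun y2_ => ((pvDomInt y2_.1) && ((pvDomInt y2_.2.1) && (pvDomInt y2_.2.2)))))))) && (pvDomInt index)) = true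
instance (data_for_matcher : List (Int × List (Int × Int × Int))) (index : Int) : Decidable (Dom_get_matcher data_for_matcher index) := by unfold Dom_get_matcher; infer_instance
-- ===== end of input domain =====

-- B replaces A's interleaved max-tracking/matcher loop by a group-by-y pass followed by a max-per-group pass (objective: alternative decomposition, same cost).

-- shared transliteration helpers (both Pythons index the outer dict, iterate the inner dict's items,
-- and compute `int(str(x)[:2]) if len(str(x)) > 3 else int(x)`)
-- str(x)[:2] is exactly `take 2`; int() of the first two chars of str(x) always succeeds, so getD 0 is never hit
def pvF (x : Int) : Int :=
  if 3 < (PySem.Int.toChars x).length then (PySem.Int.ofChars? ((PySem.Int.toChars x).take 2)).getD 0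
  else x

-- data_for_matcher[index].items(): the assoc list stands for the Python dict (duplicates overwrite, first position kept)
def pvItems (data_ : List (Int × Int × Int)) : List ((Int × Int) × Int) :=
  (PySem.Dict.ofList (data_.map (fun t => ((t.1, t.2.1), t.2.2)))).items

-- ===== PORT A =====
-- loop body of A: `if y not in max_per_y or value > max_per_y[y][1]: max_per_y[y] = (x, value); matcher[int(y)] = ...`
def pvStepA (st : PySem.Dict Int (Int × Int) × PySem.Dict Int Int) (p : (Int × Int) × Int) :
    PySem.Dict Int (Int × Int) × PySem.Dict Int Int :=
  if !(st.1.contains p.1.2) || decide ((st.1.getD p.1.2 (0, 0)).2 < p.2) then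
    (st.1.insert p.1.2 (p.1.1, p.2), st.2.insert p.1.2 (pvF p.1.1))
  else st

def get_matcher (data_for_matcher : List (Int × List (Int × Int × Int))) (index : Int) : List (Int × Int) :=
  match (PySem.Dict.ofList data_for_matcher).get? index with
  | none => []  -- KeyError: excluded by Pre_get_matcher
  | some data_ =>
      ((pvItems data_).foldl pvStepA (PySem.Dict.empty, PySem.Dict.empty)).2.items

-- ===== PORT B =====
-- phase one of B: `groups.setdefault(y, []).append((x, value))`
def pvStepGroup (g : PySem.Dict Int (List (Int × Int))) (p : (Int × Int) × Int) :
    PySem.Dict Int (List (Int × Int)) :=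
  g.modify p.1.2 [] (· ++ [(p.1.1, p.2)])

-- phase two of B: `matcher[int(y)] = f(max(pairs, key=lambda p: p[1])[0])` (max = first maximal, PySem.List.maxD;
-- groups' lists are never empty, so the default (0, 0) is never hit)
def pvStepMatch (m : PySem.Dict Int Int) (q : Int × List (Int × Int)) : PySem.Dict Int Int :=
  m.insert q.1 (pvF (PySem.List.maxD q.2 (fun r => r.2) (0, 0)).1)

def get_matcher_alt (data_for_matcher : List (Int × List (Int × Int × Int))) (index : Int) : List (Int × Int) :=
  match (PySem.Dict.ofList data_for_matcher).get? index with
  | none => []  -- KeyError: excluded by Pre_get_matcher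
  | some data_ =>
      (((pvItems data_).foldl pvStepGroup PySem.Dict.empty).items.foldl pvStepMatch PySem.Dict.empty).items

-- ===== PRECONDITION & SPEC =====
-- Python A raises KeyError iff index is not a key of data_for_matcher; that is all Pre_ excludes.
def Pre_get_matcher (data_for_matcher : List (Int × List (Int × Int × Int))) (index : Int) : Prop :=
  index ∈ data_for_matcher.map Prod.fst
instance (data_for_matcher : List (Int × List (Int × Int × Int))) (index : Int) : Decidable (Pre_get_matcher data_for_matcher index) := by unfold Pre_get_matcher; infer_instance

def pvWitness_get_matcher : (List (Int × List (Int × Int × Int))) × Int := ([(0, [(12345, 7, 3), (4, 7, 5)])], 0)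

def Spec_get_matcher (data_for_matcher : List (Int × List (Int × Int × Int))) (index : Int) (out : List (Int × Int)) : Prop := out = get_matcher_alt data_for_matcher index
instance (data_for_matcher : List (Int × List (Int × Int × Int))) (index : Int) (out : List (Int × Int)) : Decidable (Spec_get_matcher data_for_matcher index out) := by unfold Spec_get_matcher; infer_instance

-- ===== CLAIM (what is proved, stated in full; the proofs are below) =====
def Claim_equal_get_matcher : Prop := ∀ (data_for_matcher : List (Int × List (Int × Int × Int))) (index : Int), Dom_get_matcher data_for_matcher index → Pre_get_matcher data_for_matcher index → Spec_get_matcher data_for_matcher index (get_matcher data_for_matcher index)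

-- ===== LEMMAS AND PROOFS =====

-- the group of an item key y, its first-maximal pair, and the first-seen y order
def pvGroup (l : List ((Int × Int) × Int)) (y : Int) : List (Int × Int) :=
  (l.filter (fun p => p.1.2 == y)).map (fun p => (p.1.1, p.2))

def pvBest (g : List (Int × Int)) : Int × Int := PySem.List.maxD g (fun r => r.2) (0, 0)

def pvKeys (l : List ((Int × Int) × Int)) : List Int := PySem.Set.ofList (l.map (fun p => p.1.2))

theorem pvMapFst {A : Type} (S : List Int) (f : Int → A) :
    (S.map (fun y => (y, f y))).map (fun x => x.1) = S := by
  induction S with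
  | nil => rfl
  | cons a t ih => simp [ih]

theorem pvBest_append (g : List (Int × Int)) (q : Int × Int) (h : g ≠ []) :
    pvBest (g ++ [q]) = if (pvBest g).2 < q.2 then q else pvBest g := by
  obtain ⟨m, hm⟩ : ∃ m, PySem.List.max? g (fun r => r.2) = some m := by
    cases hg : PySem.List.max? g (fun r => r.2) with
    | none => exact absurd ((PySem.List.max?_eq_none_iff g _).mp hg) h
    | some m => exact ⟨m, rfl⟩
  simp only [pvBest, PySem.List.maxD, PySem.List.max?] at hm ⊢
  rw [List.foldl_append, hm]
  simp only [List.foldl_cons, List.foldl_nil, Option.getD_some]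
  split_ifs <;> rfl

theorem pvGroup_append (l : List ((Int × Int) × Int)) (p : (Int × Int) × Int) (y : Int) :
    pvGroup (l ++ [p]) y = pvGroup l y ++ (if p.1.2 = y then [(p.1.1, p.2)] else []) := by
  by_cases hp : p.1.2 = y <;> simp [pvGroup, List.filter_append, hp]

theorem pvKeys_append (l : List ((Int × Int) × Int)) (p : (Int × Int) × Int) :
    pvKeys (l ++ [p]) = PySem.Set.add (pvKeys l) p.1.2 := by
  simp [pvKeys, PySem.Set.ofList_append_singleton]

theorem pvGroup_eq_nil (l : List ((Int × Int) × Int)) (y : Int) (h : y ∉ pvKeys l) :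
    pvGroup l y = [] := by
  simp only [pvKeys, PySem.Set.mem_ofList, List.mem_map] at h
  push_neg at h
  simp only [pvGroup, List.map_eq_nil_iff, List.filter_eq_nil_iff]
  intro p hp
  simpa using h p hp

theorem pvGroup_ne_nil (l : List ((Int × Int) × Int)) (y : Int) (h : y ∈ pvKeys l) :
    pvGroup l y ≠ [] := by
  simp only [pvKeys, PySem.Set.mem_ofList, List.mem_map] at h
  obtain ⟨p, hp, he⟩ := h
  simp only [pvGroup, ne_eq, List.map_eq_nil_iff, List.filter_eq_nil_iff]
  push_neg
  exact ⟨p, hp, by simp [he]⟩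

-- A's fold, characterised: max_per_y and matcher list the first-seen ys with the first-maximal pair of each group
theorem pvA_char (l : List ((Int × Int) × Int)) :
    (l.foldl pvStepA (PySem.Dict.empty, PySem.Dict.empty)).1.items
      = (pvKeys l).map (fun y => (y, pvBest (pvGroup l y)))
    ∧ (l.foldl pvStepA (PySem.Dict.empty, PySem.Dict.empty)).2.items
      = (pvKeys l).map (fun y => (y, pvF (pvBest (pvGroup l y)).1)) := by
  induction l using List.reverseRecOn with
  | nil => exact ⟨rfl, rfl⟩
  | append_singleton l p ih =>
    obtain ⟨h1, h2⟩ := ih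
    rw [List.foldl_append, List.foldl_cons, List.foldl_nil]
    set st := l.foldl pvStepA (PySem.Dict.empty, PySem.Dict.empty) with hst
    have hkeys1 : st.1.keys = pvKeys l := by
      simp only [PySem.Dict.keys, h1]; exact pvMapFst _ _
    have hkeys2 : st.2.keys = pvKeys l := by
      simp only [PySem.Dict.keys, h2]; exact pvMapFst _ _
    have hnodupS : (pvKeys l).Nodup := PySem.Set.nodup_ofList _
    have hndk : st.1.keys.Nodup := by rw [hkeys1]; exact hnodupS
    have hcont : st.1.contains p.1.2 = decide (p.1.2 ∈ pvKeys l) := by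
      rw [PySem.Dict.contains_eq_decide_mem_keys, hkeys1]
    have hcont2 : st.2.contains p.1.2 = decide (p.1.2 ∈ pvKeys l) := by
      rw [PySem.Dict.contains_eq_decide_mem_keys, hkeys2]
    by_cases hy : p.1.2 ∈ pvKeys l
    · have hgd : st.1.getD p.1.2 (0, 0) = pvBest (pvGroup l p.1.2) := by
        refine PySem.Dict.getD_of_mem_items _ ?_ hndk (0, 0)
        rw [h1]
        exact List.mem_map_of_mem hy
      have hcontT : st.1.contains p.1.2 = true := by rw [hcont]; simp [hy]
      have hcontT2 : st.2.contains p.1.2 = true := by rw [hcont2]; simp [hy]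
      rw [pvStepA, hcont, hgd, pvKeys_append, PySem.Set.add_of_mem hy]
      by_cases hlt : (pvBest (pvGroup l p.1.2)).2 < p.2
      · simp only [hy, decide_true, hlt, Bool.or_true, if_true]
        constructor
        · rw [PySem.Dict.items_insert_of_contains _ _ hcontT, h1, List.map_map]
          refine List.map_congr_left fun y' hy' => ?_
          by_cases hyy : y' = p.1.2
          · subst hyy
            simp [pvGroup_append, pvBest_append _ _ (pvGroup_ne_nil l _ hy), hlt]
          · simp [hyy, pvGroup_append, Ne.symm hyy]
        · rw [PySem.Dict.items_insert_of_contains _ _ hcontT2, h2, List.map_map]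
          refine List.map_congr_left fun y' hy' => ?_
          by_cases hyy : y' = p.1.2
          · subst hyy
            simp [pvGroup_append, pvBest_append _ _ (pvGroup_ne_nil l _ hy), hlt]
          · simp [hyy, pvGroup_append, Ne.symm hyy]
      · simp only [hy, decide_true, hlt, decide_false, Bool.or_false, Bool.not_true,
          Bool.false_eq_true, if_false]
        constructor
        · rw [h1]
          refine List.map_congr_left fun y' hy' => ?_
          by_cases hyy : y' = p.1.2
          · subst hyy
            rw [pvGroup_append, if_pos rfl, pvBest_append _ _ (pvGroup_ne_nil l _ hy), if_neg hlt]
          · rw [pvGroup_append, if_neg (Ne.symm hyy)]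
            simp
        · rw [h2]
          refine List.map_congr_left fun y' hy' => ?_
          by_cases hyy : y' = p.1.2
          · subst hyy
            rw [pvGroup_append, if_pos rfl, pvBest_append _ _ (pvGroup_ne_nil l _ hy), if_neg hlt]
          · rw [pvGroup_append, if_neg (Ne.symm hyy)]
            simp
    · have hcontF : st.1.contains p.1.2 = false := by rw [hcont]; simp [hy]
      have hcontF2 : st.2.contains p.1.2 = false := by rw [hcont2]; simp [hy]
      rw [pvStepA, hcont, pvKeys_append, PySem.Set.add_of_not_mem hy]
      simp only [hy, decide_false, Bool.not_false, Bool.true_or, if_true]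
      have hgnew : pvGroup (l ++ [p]) p.1.2 = [(p.1.1, p.2)] := by
        rw [pvGroup_append, if_pos rfl, pvGroup_eq_nil l _ hy, List.nil_append]
      constructor
      · rw [PySem.Dict.items_insert_of_not_contains _ _ hcontF, h1, List.map_append]
        congr 1
        · refine List.map_congr_left fun y' hy' => ?_
          have hyy : y' ≠ p.1.2 := fun e => hy (e ▸ hy')
          rw [pvGroup_append, if_neg (Ne.symm hyy)]
          simp
        · simp [hgnew, pvBest, PySem.List.maxD, PySem.List.max?]
      · rw [PySem.Dict.items_insert_of_not_contains _ _ hcontF2, h2, List.map_append]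
        congr 1
        · refine List.map_congr_left fun y' hy' => ?_
          have hyy : y' ≠ p.1.2 := fun e => hy (e ▸ hy')
          rw [pvGroup_append, if_neg (Ne.symm hyy)]
          simp
        · simp [hgnew, pvBest, PySem.List.maxD, PySem.List.max?]

-- B's two phases, characterised the same way
theorem pvB_char (l : List ((Int × Int) × Int)) :
    ((l.foldl pvStepGroup PySem.Dict.empty).items.foldl pvStepMatch PySem.Dict.empty).items
      = (pvKeys l).map (fun y => (y, pvF (pvBest (pvGroup l y)).1)) := by
  set g := l.foldl pvStepGroup PySem.Dict.empty with hg
  have hkeys : g.keys = pvKeys l := by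
    have h := PySem.Dict.keys_foldl_modify_key (κ := Int) (ν := List (Int × Int)) l
      (fun p => p.1.2) [] (fun _ p v => v ++ [(p.1.1, p.2)]) PySem.Dict.empty
    simpa [hg, pvStepGroup, pvKeys, PySem.Set.update_nil_left] using h
  have hnodup : g.keys.Nodup := by rw [hkeys]; exact PySem.Set.nodup_ofList _
  have hgetD : ∀ y, g.getD y [] = pvGroup l y := by
    intro y
    have hfold : g = (l.map (fun p => (p.1.2, (p.1.1, p.2)))).foldl
        (fun d q => d.modify q.1 [] (· ++ [q.2])) PySem.Dict.empty := by
      rw [List.foldl_map]; rfl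
    rw [hfold, PySem.Dict.getD_foldl_modify_append, PySem.Dict.getD_empty, List.filter_map,
      List.map_map]
    simp [pvGroup, Function.comp_def]
  have hitems : g.items = (pvKeys l).map (fun y => (y, pvGroup l y)) := by
    rw [PySem.Dict.items_eq_map_keys g hnodup [], hkeys]
    exact List.map_congr_left fun y _ => by rw [hgetD y]
  have hnodup' : (List.map (fun q : Int × List (Int × Int) => q.1) g.items).Nodup := hnodup
  have hfresh := PySem.Dict.items_foldl_insert_fresh (d := PySem.Dict.empty) g.items
      (fun q => q.1) (fun q => pvF (PySem.List.maxD q.2 (fun r => r.2) (0, 0)).1)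
      (fun a _ => PySem.Dict.contains_empty _) hnodup'
  show (List.foldl (fun (d : PySem.Dict Int Int) (a : Int × List (Int × Int)) =>
      d.insert a.1 (pvF (PySem.List.maxD a.2 (fun r => r.2) (0, 0)).1))
      PySem.Dict.empty g.items).items = _
  rw [hfresh, hitems, List.map_map]
  have he : (PySem.Dict.empty : PySem.Dict Int Int).items = [] := rfl
  rw [he, List.nil_append]
  simp [Function.comp_def, pvBest]
-- ===== VERDICT (by name: the statement is the Claim_ definition above) =====
theorem get_matcher_spec : Claim_equal_get_matcher := by
  intro dfm index _ _
  unfold Spec_get_matcher get_matcher get_matcher_alt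
  cases h : (PySem.Dict.ofList dfm).get? index with
  | none => rfl
  | some data_ =>
      show ((pvItems data_).foldl pvStepA (PySem.Dict.empty, PySem.Dict.empty)).2.items
        = (((pvItems data_).foldl pvStepGroup PySem.Dict.empty).items.foldl pvStepMatch
            PySem.Dict.empty).items
      rw [(pvA_char (pvItems data_)).2, pvB_char (pvItems data_)]
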